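-- pv_equiv track=rewrite | github.com/SaiFUllaH-KhaN1/ebenezer_uef_myontec_prototype | streamlit_server.py | _clean_elapsed_time_value
-- ===== SOURCE A (Python) =====
-- def _clean_elapsed_time_value(s: str) -> str:
--     s = str(s).strip() if s else ""
--     if not s:
--         return ""
--
--     s = s.replace(",", ".").replace("\t", ".")
--     filtered = "".join(ch for ch in s if ch.isdigit() or ch == ".")
--
--     if filtered.count(".") > 1:
--         first_dot = filtered.find(".")
--         filtered = filtered[: first_dot + 1] + filtered[first_dot + 1 :].replace(".", "")
--
--     return filtered
-- ===== SOURCE B (Python) =====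
-- def _clean_elapsed_time_value(s: str) -> str:
--     s = str(s).strip() if s else ""
--     if not s:
--         return ""
--     out = []
--     seen_dot = False
--     for ch in s:
--         if ch.isdigit():
--             out.append(ch)
--         elif ch in (",", "\t", "."):
--             if not seen_dot:
--                 out.append(".")
--                 seen_dot = True
--     return "".join(out)
-- ===== Notes on version B (the rewrite author's own statement) =====
-- stated objective: simpler
-- what changed: Replaces A's replace/filter pipeline plus the count/find/slice/replace dot-collapse postpass with one stateful scan that appends digits and emits at most one dot via a seen_dot flag.
import Mathlib
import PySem

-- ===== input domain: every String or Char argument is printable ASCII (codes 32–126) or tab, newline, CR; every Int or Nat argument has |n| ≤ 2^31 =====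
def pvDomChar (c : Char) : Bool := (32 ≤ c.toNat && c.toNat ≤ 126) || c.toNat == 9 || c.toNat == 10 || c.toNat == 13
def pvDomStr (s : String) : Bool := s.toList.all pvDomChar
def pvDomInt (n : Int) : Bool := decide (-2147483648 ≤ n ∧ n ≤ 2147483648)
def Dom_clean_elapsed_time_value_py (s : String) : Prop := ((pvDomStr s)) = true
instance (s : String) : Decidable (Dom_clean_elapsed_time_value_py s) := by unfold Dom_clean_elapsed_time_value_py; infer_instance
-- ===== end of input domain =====

-- B replaces A's replace/filter pipeline and its count/find/slice/replace dot-collapse postpass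
-- by a single stateful scan with a seen_dot flag (objective: simpler; same cost).

-- ===== PORT A =====
def clean_elapsed_time_value_py (s : String) : String :=
  -- s = str(s).strip() if s else ""
  let s1 : List Char := if s.toList = [] then [] else PySem.Chars.strip s.toList
  if s1 = [] then "" else
    -- s = s.replace(",", ".").replace("\t", ".")
    let s2 := PySem.Chars.replace (PySem.Chars.replace s1 [','] ['.']) ['\t'] ['.']
    -- filtered = "".join(ch for ch in s if ch.isdigit() or ch == ".")
    let filtered := s2.filter (fun ch => PySem.Chars.isdigit ch || ch == '.')
    let filtered2 :=
      if PySem.Chars.count filtered ['.'] > 1 then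
        let first_dot := PySem.Chars.find filtered ['.']
        -- filtered[: first_dot + 1] + filtered[first_dot + 1 :].replace(".", "")
        PySem.List.slice filtered none (some (first_dot + 1)) ++
          PySem.Chars.replace (PySem.List.slice filtered (some (first_dot + 1)) none) ['.'] []
      else filtered
    String.ofList filtered2

-- ===== PORT B =====
-- B-side helper: the loop body of Source B's single scan (out, seen_dot as the pair state)
def pvStep (st : List Char × Bool) (ch : Char) : List Char × Bool :=
  if PySem.Chars.isdigit ch then (st.1 ++ [ch], st.2)
  else if ch == ',' || ch == '\t' || ch == '.' then
    (if st.2 then st else (st.1 ++ ['.'], true))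
  else st

def clean_elapsed_time_value_py_alt (s : String) : String :=
  let s1 : List Char := if s.toList = [] then [] else PySem.Chars.strip s.toList
  if s1 = [] then "" else
    String.ofList (s1.foldl pvStep ([], false)).1

-- ===== PRECONDITION & SPEC =====
def Spec_clean_elapsed_time_value_py (s : String) (out : String) : Prop := out = clean_elapsed_time_value_py_alt s
instance (s : String) (out : String) : Decidable (Spec_clean_elapsed_time_value_py s out) := by unfold Spec_clean_elapsed_time_value_py; infer_instance

-- ===== CLAIM (what is proved, stated in full; the proofs are below) =====
def Claim_equal_clean_elapsed_time_value_py : Prop := ∀ (s : String), Dom_clean_elapsed_time_value_py s → Spec_clean_elapsed_time_value_py s (clean_elapsed_time_value_py s)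

-- ===== LEMMAS AND PROOFS =====

theorem pvReplace_go_single (a : Char) (new : List Char) :
    ∀ (fuel : Nat) (l acc : List Char), l.length ≤ fuel →
      PySem.Chars.replace.go [a] new fuel l acc =
        acc.reverse ++ l.flatMap (fun c => if c = a then new else [c]) := by
  intro fuel
  induction fuel with
  | zero =>
    intro l acc h
    have : l = [] := List.eq_nil_of_length_eq_zero (Nat.le_zero.mp h)
    subst this
    simp [PySem.Chars.replace.go]
  | succ n ih =>
    intro l acc h
    cases l with
    | nil => simp [PySem.Chars.replace.go]
    | cons c t =>
      rw [PySem.Chars.replace.go]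
      by_cases hc : c = a
      · subst hc
        simp only [List.isPrefixOf, Bool.and_true, beq_self_eq_true, if_pos]
        simp only [List.length_cons, List.length_nil, List.drop_succ_cons, List.drop_zero]
        rw [ih t _ (by simpa using h)]
        simp
      · have : ([a].isPrefixOf (c :: t)) = false := by
          simp [List.isPrefixOf]
          exact fun h' => hc h'.symm
        rw [this]
        simp only [Bool.false_eq_true, if_false]
        rw [ih t _ (by simpa using h)]
        simp [hc]

theorem pvReplace_single (l : List Char) (a : Char) (new : List Char) :
    PySem.Chars.replace l [a] new = l.flatMap (fun c => if c = a then new else [c]) := by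
  rw [PySem.Chars.replace]
  simp only [List.isEmpty_cons, Bool.false_eq_true, if_false]
  rw [pvReplace_go_single a new l.length l [] le_rfl]
  simp

theorem pvCount_go_dot :
    ∀ (fuel : Nat) (l : List Char) (acc : Nat), l.length ≤ fuel →
      PySem.Chars.count.go ['.'] fuel l acc = acc + l.count '.' := by
  intro fuel
  induction fuel with
  | zero =>
    intro l acc h
    have : l = [] := List.eq_nil_of_length_eq_zero (Nat.le_zero.mp h)
    subst this; simp [PySem.Chars.count.go]
  | succ n ih =>
    intro l acc h
    cases l with
    | nil => simp [PySem.Chars.count.go]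
    | cons c t =>
      rw [PySem.Chars.count.go]
      by_cases hc : c = '.'
      · subst hc
        simp only [List.isPrefixOf, Bool.and_true, beq_self_eq_true, if_pos]
        simp only [List.length_cons, List.length_nil, List.drop_succ_cons, List.drop_zero]
        rw [ih t _ (by simpa using h)]
        simp [List.count_cons]
        omega
      · have : (['.'].isPrefixOf (c :: t)) = false := by
          simp [List.isPrefixOf]
          exact fun h' => hc h'.symm
        rw [this]
        simp only [Bool.false_eq_true, if_false]
        rw [ih t _ (by simpa using h)]
        simp [List.count_cons, hc]

theorem pvCount_dot (l : List Char) : PySem.Chars.count l ['.'] = l.count '.' := by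
  rw [PySem.Chars.count]
  simp only [List.isEmpty_cons, Bool.false_eq_true, if_false]
  rw [pvCount_go_dot l.length l 0 le_rfl]
  omega

theorem pvFind_go_dot :
    ∀ (l : List Char) (k : Nat),
      PySem.Chars.find.go ['.'] l k = if '.' ∈ l then ((k + l.idxOf '.' : Nat) : Int) else -1 := by
  intro l
  induction l with
  | nil => intro k; simp [PySem.Chars.find.go]
  | cons c t ih =>
    intro k
    rw [PySem.Chars.find.go]
    by_cases hc : c = '.'
    · subst hc
      simp [List.isPrefixOf, List.idxOf_cons]
    · have : (['.'].isPrefixOf (c :: t)) = false := by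
        simp [List.isPrefixOf]
        exact fun h' => hc h'.symm
      rw [this]
      simp only [Bool.false_eq_true, if_false]
      rw [ih (k + 1)]
      by_cases hm : '.' ∈ t
      · simp [hm, hc, List.idxOf_cons, Ne.symm hc]
        push_cast
        ring
      · simp [hm, hc, List.mem_cons, Ne.symm hc]

theorem pvFind_dot (l : List Char) :
    PySem.Chars.find l ['.'] = if '.' ∈ l then ((l.idxOf '.' : Nat) : Int) else -1 := by
  rw [PySem.Chars.find]
  rw [pvFind_go_dot l 0]
  simp

def pvSub (c : Char) : Char := if c = '\t' then '.' else if c = ',' then '.' else c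

def pvKeep (c : Char) : Bool := PySem.Chars.isdigit c || c == '.'

def pvMF (l : List Char) : List Char := (l.map pvSub).filter pvKeep

def pvDedup : List Char → Bool → List Char
  | [], _ => []
  | c :: t, seen =>
      if c = '.' then (if seen then pvDedup t true else '.' :: pvDedup t true)
      else c :: pvDedup t seen

theorem pvDedup_true (x : List Char) : pvDedup x true = x.filter (fun c => !(c == '.')) := by
  induction x with
  | nil => simp [pvDedup]
  | cons c t ih =>
    by_cases hc : c = '.'
    · subst hc; simp [pvDedup, ih]
    · simp [pvDedup, hc, ih]

theorem pvDedup_no_dot (x : List Char) (seen : Bool) (h : '.' ∉ x) : pvDedup x seen = x := by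
  induction x with
  | nil => simp [pvDedup]
  | cons c t ih =>
    have hc : c ≠ '.' := fun hh => h (hh ▸ List.mem_cons_self ..)
    simp [pvDedup, hc, ih (fun hm => h (List.mem_cons_of_mem _ hm))]

theorem pvDedup_false_mem (x : List Char) (h : '.' ∈ x) :
    pvDedup x false =
      x.take (x.idxOf '.' + 1) ++ (x.drop (x.idxOf '.' + 1)).filter (fun c => !(c == '.')) := by
  induction x with
  | nil => simp at h
  | cons c t ih =>
    by_cases hc : c = '.'
    · subst hc
      simp [pvDedup, List.idxOf_cons, pvDedup_true]
    · have hm : '.' ∈ t := by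
        rcases List.mem_cons.mp h with h1 | h1
        · exact absurd h1.symm hc
        · exact h1
      simp [pvDedup, hc, List.idxOf_cons, Ne.symm hc, ih hm]

theorem pvFoldl_dedup :
    ∀ (l acc : List Char) (seen : Bool),
      l.foldl pvStep (acc, seen) =
        (acc ++ pvDedup (pvMF l) seen, seen || (pvMF l).any (fun c => c == '.')) := by
  intro l
  induction l with
  | nil => intro acc seen; simp [pvMF, pvDedup]
  | cons c t ih =>
    intro acc seen
    simp only [List.foldl_cons]
    by_cases hd : PySem.Chars.isdigit c = true
    · have hc1 : c ≠ '\t' := by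
        intro h; rw [h] at hd; simp [PySem.Chars.isdigit] at hd
      have hc2 : c ≠ ',' := by
        intro h; rw [h] at hd; simp [PySem.Chars.isdigit] at hd
      have hc3 : c ≠ '.' := by
        intro h; rw [h] at hd; simp [PySem.Chars.isdigit] at hd
      have hmf : pvMF (c :: t) = c :: pvMF t := by
        simp [pvMF, pvSub, hc1, hc2, pvKeep, hd]
      rw [hmf]
      have : pvStep (acc, seen) c = (acc ++ [c], seen) := by
        simp [pvStep, hd]
      rw [this, ih]
      have hb : (c == '.') = false := beq_eq_false_iff_ne.mpr hc3
      simp [pvDedup, hc3, hb]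
    · by_cases hs : c = ',' ∨ c = '\t' ∨ c = '.'
      · have hmf : pvMF (c :: t) = '.' :: pvMF t := by
          rcases hs with h | h | h <;> subst h <;>
            simp [pvMF, pvSub, pvKeep]
        rw [hmf]
        have hstep : pvStep (acc, seen) c =
            (if seen then (acc, seen) else (acc ++ ['.'], true)) := by
          rcases hs with h | h | h <;> subst h <;> simp [pvStep, hd]
        rw [hstep]
        cases seen with
        | true => rw [if_pos rfl, ih]; simp [pvDedup]
        | false => rw [if_neg (by simp), ih]; simp [pvDedup]
      · push_neg at hs
        obtain ⟨h1, h2, h3⟩ := hs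
        have hmf : pvMF (c :: t) = pvMF t := by
          simp [pvMF, pvSub, h1, h2, pvKeep, hd, h3]
        have : pvStep (acc, seen) c = (acc, seen) := by
          simp [pvStep, hd, h1, h2, h3]
        rw [this, ih, hmf]

theorem pvReplace_single_char (l : List Char) (a b : Char) :
    PySem.Chars.replace l [a] [b] = l.map (fun c => if c = a then b else c) := by
  rw [pvReplace_single]
  induction l with
  | nil => rfl
  | cons c t ih =>
    simp only [List.flatMap_cons, List.map_cons, ← ih]
    split <;> rfl

theorem pvReplace_dot_empty (l : List Char) :
    PySem.Chars.replace l ['.'] [] = l.filter (fun c => !(c == '.')) := by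
  rw [pvReplace_single]
  induction l with
  | nil => rfl
  | cons c t ih =>
    simp only [List.flatMap_cons]
    by_cases hc : c = '.' <;> simp [hc, ih]

theorem pvFiltered_eq (l : List Char) :
    (PySem.Chars.replace (PySem.Chars.replace l [','] ['.']) ['\t'] ['.']).filter
        (fun ch => PySem.Chars.isdigit ch || ch == '.') = pvMF l := by
  rw [pvReplace_single_char, pvReplace_single_char]
  unfold pvMF pvKeep
  rw [List.map_map]
  congr 1
  apply List.map_congr_left
  intro c _
  simp only [Function.comp]
  by_cases h1 : c = '\t'
  · subst h1; simp [pvSub]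
  · by_cases h2 : c = ','
    · subst h2; simp [pvSub]
    · simp [pvSub, h1, h2]

theorem pvMain (g : List Char) :
    (if PySem.Chars.count (pvMF g) ['.'] > 1 then
        PySem.List.slice (pvMF g) none (some (PySem.Chars.find (pvMF g) ['.'] + 1)) ++
          PySem.Chars.replace (PySem.List.slice (pvMF g) (some (PySem.Chars.find (pvMF g) ['.'] + 1)) none) ['.'] []
      else pvMF g) = (g.foldl pvStep ([], false)).1 := by
  rw [pvFoldl_dedup]
  simp only [List.nil_append]
  set F := pvMF g with hF
  rw [pvCount_dot]
  by_cases hgt : F.count '.' > 1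
  · rw [if_pos hgt]
    have hmem : '.' ∈ F := List.count_pos_iff.mp (by omega)
    rw [pvFind_dot, if_pos hmem]
    have hidx : ((F.idxOf '.' : Nat) : Int) + 1 = ((F.idxOf '.' + 1 : Nat) : Int) := by push_cast; ring
    rw [hidx, PySem.List.slice_to_natCast, PySem.List.slice_from_natCast]
    rw [pvReplace_dot_empty, pvDedup_false_mem F hmem]
  · rw [if_neg hgt]
    by_cases hmem : '.' ∈ F
    · have hcnt : F.count '.' = 1 := by
        have := List.count_pos_iff.mpr hmem
        omega
      rw [pvDedup_false_mem F hmem]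
      have hlt : F.idxOf '.' < F.length := List.idxOf_lt_length_of_mem hmem
      have hsplit : F = F.take (F.idxOf '.' + 1) ++ F.drop (F.idxOf '.' + 1) :=
        (List.take_append_drop _ _).symm
      have hmemtake : '.' ∈ F.take (F.idxOf '.' + 1) := by
        have h9 : (F.take (F.idxOf '.' + 1))[F.idxOf '.']'(by simp; omega) = '.' := by
          rw [List.getElem_take]
          exact List.getElem_idxOf hlt
        exact List.mem_iff_getElem.mpr ⟨F.idxOf '.', by simp; omega, h9⟩
      have hdrop0 : (F.drop (F.idxOf '.' + 1)).count '.' = 0 := by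
        have h2 : (F.take (F.idxOf '.' + 1) ++ F.drop (F.idxOf '.' + 1)).count '.' =
            (F.take (F.idxOf '.' + 1)).count '.' + (F.drop (F.idxOf '.' + 1)).count '.' :=
          List.count_append ..
        rw [← hsplit, hcnt] at h2
        have h1 : 1 ≤ (F.take (F.idxOf '.' + 1)).count '.' :=
          List.count_pos_iff.mpr hmemtake
        omega
      have hno : '.' ∉ F.drop (F.idxOf '.' + 1) := by
        intro h
        exact absurd hdrop0 (by have := List.count_pos_iff.mpr h; omega)
      rw [List.filter_eq_self.mpr (fun c hc => by
        simp only [Bool.not_eq_eq_eq_not, Bool.not_true, beq_eq_false_iff_ne]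
        intro hce; exact hno (hce ▸ hc))]
      exact hsplit
    · rw [pvDedup_no_dot F false hmem]

-- ===== VERDICT (by name: the statement is the Claim_ definition above) =====
theorem clean_elapsed_time_value_py_spec : Claim_equal_clean_elapsed_time_value_py := by
  intro s _
  unfold Spec_clean_elapsed_time_value_py clean_elapsed_time_value_py clean_elapsed_time_value_py_alt
  set s1 : List Char := if s.toList = [] then [] else PySem.Chars.strip s.toList with hs1
  by_cases h : s1 = []
  · rw [if_pos h, if_pos h]
  · rw [if_neg h, if_neg h]
    simp only [pvFiltered_eq, pvMain]
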